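-- pv_equiv track=rewrite | github.com/sps989/Impact-Analytics--Python-Assignment---Case-Study | casestudy.py | graduation_ceremony_probability
-- ===== SOURCE A (Python) =====
-- def graduation_ceremony_probability(N):
--     ways_to_attend = [0] * (N + 1)
--
--     ways_to_attend[1] = 1
--
--     for i in range(2, N + 1):
--         ways_to_attend[i] = ways_to_attend[i - 1] + ways_to_attend[i - 2]
--
--     total_ways_to_attend = sum(ways_to_attend)
--
--     probability_missing = total_ways_to_attend - ways_to_attend[N]
--
--     result_string = f"{probability_missing}/{total_ways_to_attend}"
--
--     return result_string
-- ===== SOURCE B (Python) =====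
-- def graduation_ceremony_probability(N):
--     # Fast-doubling Fibonacci: fib_pair(k) = (F(k), F(k+1)) in O(log k) big-int ops.
--     def fib_pair(k):
--         if k == 0:
--             return (0, 1)
--         a, b = fib_pair(k >> 1)
--         c = a * (2 * b - a)
--         d = a * a + b * b
--         if k & 1:
--             return (d, c + d)
--         return (c, d)
--
--     fN, fN1 = fib_pair(N)
--     total = fN + fN1 - 1          # sum F(1)..F(N) = F(N+2) - 1
--     return f"{total - fN}/{total}"
-- ===== Notes on version B (the rewrite author's own statement) =====
-- stated objective: faster
-- what changed: Replaces the O(N) DP table plus sum with fast-doubling Fibonacci and the closed form sum F(1..N)=F(N+2)-1, so no list is built at all.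
-- outside the precondition, e.g. on graduation_ceremony_probability(0): A raises IndexError, B returns '0/0'; on graduation_ceremony_probability(-1): A raises IndexError, B raises RecursionError
import Mathlib
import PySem

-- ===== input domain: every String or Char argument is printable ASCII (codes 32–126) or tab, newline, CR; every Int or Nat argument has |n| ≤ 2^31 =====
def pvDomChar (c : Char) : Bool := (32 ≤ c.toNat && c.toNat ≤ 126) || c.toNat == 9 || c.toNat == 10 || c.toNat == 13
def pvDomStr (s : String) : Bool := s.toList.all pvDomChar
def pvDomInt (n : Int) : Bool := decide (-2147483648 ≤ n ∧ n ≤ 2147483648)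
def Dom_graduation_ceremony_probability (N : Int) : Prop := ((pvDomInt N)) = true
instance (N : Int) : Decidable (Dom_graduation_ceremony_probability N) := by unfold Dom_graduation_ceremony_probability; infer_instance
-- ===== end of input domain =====

-- B replaces A's O(N) DP table and sum with fast-doubling Fibonacci and the closed form
-- sum F(1..N) = F(N+2) - 1 (O(log N) big-int steps); equivalence proved for N ≥ 1 (A raises IndexError otherwise).

-- ===== PORT A =====
def graduation_ceremony_probability (N : Int) : String :=
  let ways0 := PySem.List.pyRepeat [(0 : Int)] (N + 1)
  let ways1 := PySem.List.pySetD ways0 1 1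
  let ways := (PySem.List.pyRange 2 (N + 1) 1).foldl
      (fun w i => PySem.List.pySetD w i
        (PySem.List.pyGetD w (i - 1) 0 + PySem.List.pyGetD w (i - 2) 0)) ways1
  let total := ways.sum
  let missing := total - PySem.List.pyGetD ways N 0
  PySem.Int.toStr missing ++ "/" ++ PySem.Int.toStr total

-- ===== PORT B =====
-- fast-doubling helper: fib_pair(k) = (F(k), F(k+1))
def pvFibPair (k : Nat) : Int × Int :=
  if h : k = 0 then (0, 1)
  else
    let p := pvFibPair (k / 2)
    let a := p.1
    let b := p.2
    let c := a * (2 * b - a)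
    let d := a * a + b * b
    if k % 2 = 1 then (d, c + d) else (c, d)
termination_by k
decreasing_by exact Nat.div_lt_self (Nat.pos_of_ne_zero h) (by norm_num)

def graduation_ceremony_probability_alt (N : Int) : String :=
  let p := pvFibPair N.toNat
  let total := p.1 + p.2 - 1
  PySem.Int.toStr (total - p.1) ++ "/" ++ PySem.Int.toStr total

-- ===== PRECONDITION & SPEC =====
-- Pre_ excludes exactly N ≤ 0, where A raises IndexError (ways_to_attend[1] on a list of length ≤ 1).
def Pre_graduation_ceremony_probability (N : Int) : Prop := 1 ≤ N
instance (N : Int) : Decidable (Pre_graduation_ceremony_probability N) := by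
  unfold Pre_graduation_ceremony_probability; infer_instance
def pvWitness_graduation_ceremony_probability : Int := (5)

def Spec_graduation_ceremony_probability (N : Int) (out : String) : Prop := out = graduation_ceremony_probability_alt N
instance (N : Int) (out : String) : Decidable (Spec_graduation_ceremony_probability N out) := by unfold Spec_graduation_ceremony_probability; infer_instance

-- ===== CLAIM (what is proved, stated in full; the proofs are below) =====
def Claim_equal_graduation_ceremony_probability : Prop := ∀ (N : Int), Dom_graduation_ceremony_probability N → Pre_graduation_ceremony_probability N → Spec_graduation_ceremony_probability N (graduation_ceremony_probability N)

-- ===== LEMMAS AND PROOFS =====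

-- list state of A's loop just before iteration i: fib j at indices j < i, zeros above
def pvFibL (n i : Nat) : List Int :=
  (List.range (n + 1)).map (fun j => if j < i then (Nat.fib j : Int) else 0)

theorem pvFibPair_eq (k : Nat) :
    pvFibPair k = ((Nat.fib k : Int), (Nat.fib (k + 1) : Int)) := by
  induction k using Nat.strong_induction_on with
  | _ k ih =>
    by_cases h : k = 0
    · rw [pvFibPair]; simp [h]
    · have ihm := ih (k / 2) (Nat.div_lt_self (Nat.pos_of_ne_zero h) (by norm_num))
      rw [pvFibPair, dif_neg h]
      simp only [ihm]
      have hcast : ∀ m : Nat, (Nat.fib (2 * m) : Int)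
          = (Nat.fib m : Int) * (2 * (Nat.fib (m + 1) : Int) - (Nat.fib m : Int)) := by
        intro m
        have hle : Nat.fib m ≤ 2 * Nat.fib (m + 1) :=
          le_trans (Nat.fib_le_fib_succ) (by omega)
        rw [Nat.fib_two_mul]
        push_cast [Nat.cast_sub hle]
        ring
      have hodd : ∀ m : Nat, (Nat.fib (2 * m + 1) : Int)
          = (Nat.fib m : Int) * (Nat.fib m : Int)
            + (Nat.fib (m + 1) : Int) * (Nat.fib (m + 1) : Int) := by
        intro m
        rw [Nat.fib_two_mul_add_one]
        push_cast
        ring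
      rcases Nat.mod_two_eq_zero_or_one k with hk | hk
      · obtain ⟨m, rfl⟩ : ∃ m, k = 2 * m := ⟨k / 2, by omega⟩
        have hm : 2 * m / 2 = m := by omega
        rw [hm, hk, if_neg (by decide : ¬ (0 : Nat) = 1)]
        refine Prod.ext ?_ ?_
        · exact (hcast m).symm
        · exact (hodd m).symm
      · obtain ⟨m, rfl⟩ : ∃ m, k = 2 * m + 1 := ⟨k / 2, by omega⟩
        have hm : (2 * m + 1) / 2 = m := by omega
        rw [hm, hk, if_pos rfl]
        refine Prod.ext ?_ ?_
        · exact (hodd m).symm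
        · show _ = (Nat.fib (2 * m + 1 + 1) : Int)
          rw [show 2 * m + 1 + 1 = 2 * m + 2 from by ring, Nat.fib_add_two]
          push_cast
          rw [hcast, hodd]

theorem pvFibL_length (n i : Nat) : (pvFibL n i).length = n + 1 := by
  simp [pvFibL]

theorem pvFibL_get (n i j : Nat) (hj : j < n + 1) :
    (pvFibL n i)[j]'(by rw [pvFibL_length]; exact hj)
      = if j < i then (Nat.fib j : Int) else 0 := by
  simp [pvFibL]

theorem pv_init_eq (n : Nat) :
    (List.replicate (n + 1) (0 : Int)).set 1 1 = pvFibL n 2 := by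
  apply List.ext_getElem
  · simp [pvFibL_length]
  · intro j h1 h2
    have hj : j < n + 1 := by simpa using h1
    rw [pvFibL_get n 2 j hj, List.getElem_set]
    by_cases h1j : (1 : Nat) = j
    · subst h1j
      rw [if_pos rfl, if_pos (by omega)]
      simp [Nat.fib]
    · rw [if_neg h1j, List.getElem_replicate]
      by_cases h0 : j = 0
      · subst h0; simp [Nat.fib]
      · rw [if_neg (by omega : ¬ j < 2)]

theorem pv_step_eq (n i : Nat) (h2 : 2 ≤ i) (hi : i ≤ n) :
    PySem.List.pySetD (pvFibL n i) (i : Int)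
      (PySem.List.pyGetD (pvFibL n i) ((i : Int) - 1) 0
        + PySem.List.pyGetD (pvFibL n i) ((i : Int) - 2) 0)
      = pvFibL n (i + 1) := by
  obtain ⟨t, rfl⟩ : ∃ t, i = t + 2 := ⟨i - 2, by omega⟩
  have hlen : (pvFibL n (t + 2)).length = n + 1 := pvFibL_length n (t + 2)
  have hg1 : PySem.List.pyGetD (pvFibL n (t + 2)) (((t + 2 : Nat) : Int) - 1) 0
      = (Nat.fib (t + 1) : Int) := by
    rw [show (((t + 2 : Nat) : Int) - 1) = ((t + 1 : Nat) : Int) from by push_cast; ring,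
      PySem.List.pyGetD_natCast, List.getD_eq_getElem?_getD,
      List.getElem?_eq_getElem (by omega), pvFibL_get n (t + 2) (t + 1) (by omega),
      if_pos (by omega : t + 1 < t + 2), Option.getD_some]
  have hg2 : PySem.List.pyGetD (pvFibL n (t + 2)) (((t + 2 : Nat) : Int) - 2) 0
      = (Nat.fib t : Int) := by
    rw [show (((t + 2 : Nat) : Int) - 2) = ((t : Nat) : Int) from by push_cast; ring,
      PySem.List.pyGetD_natCast, List.getD_eq_getElem?_getD,
      List.getElem?_eq_getElem (by omega), pvFibL_get n (t + 2) t (by omega),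
      if_pos (by omega : t < t + 2), Option.getD_some]
  rw [hg1, hg2, PySem.List.pySetD_natCast]
  have hfib : (Nat.fib (t + 1) : Int) + (Nat.fib t : Int) = (Nat.fib (t + 2) : Int) := by
    rw [Nat.fib_add_two]; push_cast; ring
  rw [hfib]
  apply List.ext_getElem
  · simp [pvFibL_length]
  · intro j hj1 hj2
    have hj : j < n + 1 := by rw [pvFibL_length] at hj2; exact hj2
    rw [List.getElem_set, pvFibL_get n (t + 2 + 1) j hj]
    by_cases hji : t + 2 = j
    · subst hji
      rw [if_pos rfl, if_pos (by omega)]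
    · rw [if_neg hji, pvFibL_get n (t + 2) j hj]
      by_cases hlt : j < t + 2
      · rw [if_pos hlt, if_pos (by omega)]
      · rw [if_neg hlt, if_neg (by omega : ¬ j < t + 2 + 1)]

theorem pv_loop_eq (n m : Nat) (hm : 2 + m ≤ n + 1) :
    (PySem.List.pyRange 2 (2 + (m : Int)) 1).foldl
      (fun w i => PySem.List.pySetD w i
        (PySem.List.pyGetD w (i - 1) 0 + PySem.List.pyGetD w (i - 2) 0)) (pvFibL n 2)
      = pvFibL n (2 + m) := by
  induction m with
  | zero =>
    rw [show (2 : Int) + ((0 : Nat) : Int) = 2 from by norm_num,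
      PySem.List.pyRange_one_eq_nil le_rfl]
    rfl
  | succ m ih =>
    have hm' : 2 + m ≤ n + 1 := by omega
    have hsplit : PySem.List.pyRange 2 (2 + ((m + 1 : Nat) : Int)) 1
        = PySem.List.pyRange 2 (2 + (m : Int)) 1 ++ [2 + (m : Int)] := by
      have h1 : (2 : Int) + ((m + 1 : Nat) : Int) = (2 + (m : Int)) + 1 := by push_cast; ring
      rw [h1, PySem.List.pyRange_one_succ_right (by omega)]
    rw [hsplit, List.foldl_append, ih hm']
    have hc : (2 : Int) + (m : Int) = ((2 + m : Nat) : Int) := by push_cast; ring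
    simp only [List.foldl_cons, List.foldl_nil, hc]
    rw [pv_step_eq n (2 + m) (by omega) (by omega)]
    rfl

theorem pv_sum_fib (m : Nat) :
    ((List.range m).map (fun j => (Nat.fib j : Int))).sum = (Nat.fib (m + 1) : Int) - 1 := by
  induction m with
  | zero => simp [Nat.fib]
  | succ m ih =>
    rw [List.range_succ, List.map_append, List.sum_append, ih]
    simp only [List.map_cons, List.map_nil, List.sum_cons, List.sum_nil]
    rw [Nat.fib_add_two]
    push_cast
    ring

-- ===== VERDICT (by name: the statement is the Claim_ definition above) =====
theorem graduation_ceremony_probability_spec : Claim_equal_graduation_ceremony_probability := by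
  intro N _ hpre
  unfold Spec_graduation_ceremony_probability
  unfold Pre_graduation_ceremony_probability at hpre
  obtain ⟨n, rfl⟩ : ∃ n : Nat, N = (n : Int) := ⟨N.toNat, by omega⟩
  have hn : 1 ≤ n := by exact_mod_cast hpre
  unfold graduation_ceremony_probability graduation_ceremony_probability_alt
  simp only []
  -- A side: identify the final list
  have hrep : PySem.List.pyRepeat [(0 : Int)] ((n : Int) + 1) = List.replicate (n + 1) 0 := by
    rw [PySem.List.pyRepeat_singleton]
    norm_num
  have hinit : PySem.List.pySetD (List.replicate (n + 1) (0 : Int)) 1 1 = pvFibL n 2 := by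
    rw [PySem.List.pySetD_of_nonneg]
    · simpa using pv_init_eq n
    · norm_num
  have hloop := pv_loop_eq n (n - 1) (by omega)
  have hend : (2 : Int) + ((n - 1 : Nat) : Int) = (n : Int) + 1 := by omega
  have hend2 : 2 + (n - 1) = n + 1 := by omega
  rw [hend, hend2] at hloop
  rw [hrep, hinit, hloop]
  -- the final list is exactly the fib table
  have hfin : pvFibL n (n + 1) = (List.range (n + 1)).map (fun j => (Nat.fib j : Int)) := by
    unfold pvFibL
    apply List.map_congr_left
    intro j hj
    rw [List.mem_range] at hj
    rw [if_pos hj]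
  have hsum : (pvFibL n (n + 1)).sum = (Nat.fib (n + 2) : Int) - 1 := by
    rw [hfin, pv_sum_fib]
  have hgetN : PySem.List.pyGetD (pvFibL n (n + 1)) (n : Int) 0 = (Nat.fib n : Int) := by
    rw [PySem.List.pyGetD_natCast]
    rw [List.getD_eq_getElem?_getD, List.getElem?_eq_getElem (by rw [pvFibL_length]; omega)]
    rw [pvFibL_get n (n + 1) n (by omega)]
    simp
  rw [hsum, hgetN]
  -- B side
  have htn : ((n : Int)).toNat = n := by omega
  rw [htn, pvFibPair_eq]
  have hfib2 : (Nat.fib n : Int) + (Nat.fib (n + 1) : Int) - 1 = (Nat.fib (n + 2) : Int) - 1 := by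
    rw [Nat.fib_add_two]
    push_cast
    ring
  rw [hfib2]
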